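-- pv_equiv track=rewrite | github.com/UpayanGhosh/Synapse-OSS | workspace/sci_fi_dashboard/llm_router.py | _inside_double_quoted_string
-- ===== SOURCE A (Python) =====
-- def _inside_double_quoted_string(text: str) -> bool:
--     in_quote = False
--     escaped = False
--     for char in text:
--         if escaped:
--             escaped = False
--             continue
--         if char == "\\":
--             escaped = True
--             continue
--         if char == '"':
--             in_quote = not in_quote
--     return in_quote
-- ===== SOURCE B (Python) =====
-- import re
--
-- def _inside_double_quoted_string(text: str) -> bool:
--     stripped = re.sub(r'\\.', '', text, flags=re.DOTALL)
--     return stripped.count('"') % 2 == 1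
-- ===== Notes on version B (the rewrite author's own statement) =====
-- stated objective: idiomatic
-- what changed: Replaced the per-character in_quote/escaped state-machine loop with a regex pass deleting every backslash-plus-next-char pair followed by a parity check on the remaining double-quote count.
import Mathlib
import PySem

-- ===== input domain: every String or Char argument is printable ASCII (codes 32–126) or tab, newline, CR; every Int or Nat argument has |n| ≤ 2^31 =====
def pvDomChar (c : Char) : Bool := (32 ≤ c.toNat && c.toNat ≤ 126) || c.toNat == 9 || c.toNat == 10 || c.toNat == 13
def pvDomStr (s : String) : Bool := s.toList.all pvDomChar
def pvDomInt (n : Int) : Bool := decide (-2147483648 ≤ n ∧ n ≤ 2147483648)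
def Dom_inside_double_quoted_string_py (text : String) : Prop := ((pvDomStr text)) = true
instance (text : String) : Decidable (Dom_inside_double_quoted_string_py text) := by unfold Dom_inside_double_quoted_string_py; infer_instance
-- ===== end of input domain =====

-- B replaces A's in_quote/escaped state-machine loop by a strip-escaped-pairs pass plus a quote-parity count (idiomatic, same cost).

-- ===== PORT A =====
-- the loop body: state = (in_quote, escaped)
def pvStepA (st : Bool × Bool) (c : Char) : Bool × Bool :=
  if st.2 then (st.1, false)
  else if c = '\\' then (st.1, true)
  else if c = '"' then (!st.1, false)
  else (st.1, false)

def inside_double_quoted_string_py (text : String) : Bool :=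
  (text.toList.foldl pvStepA (false, false)).1

-- ===== PORT B =====
-- re.sub(r'\\.', '', text, re.DOTALL): delete each backslash together with the following char (a trailing lone backslash stays)
def pvStripEsc : List Char → List Char
  | [] => []
  | '\\' :: _ :: t => pvStripEsc t
  | c :: t => c :: pvStripEsc t

def inside_double_quoted_string_py_alt (text : String) : Bool :=
  (pvStripEsc text.toList).count '"' % 2 == 1

-- ===== PRECONDITION & SPEC =====
def Spec_inside_double_quoted_string_py (text : String) (out : Bool) : Prop := out = inside_double_quoted_string_py_alt text
instance (text : String) (out : Bool) : Decidable (Spec_inside_double_quoted_string_py text out) := by unfold Spec_inside_double_quoted_string_py; infer_instance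

-- ===== CLAIM (what is proved, stated in full; the proofs are below) =====
def Claim_equal_inside_double_quoted_string_py : Prop := ∀ (text : String), Dom_inside_double_quoted_string_py text → Spec_inside_double_quoted_string_py text (inside_double_quoted_string_py text)

-- ===== LEMMAS AND PROOFS =====
theorem pvFold_eq (l : List Char) : ∀ (q : Bool),
    (List.foldl pvStepA (q, false) l).1 = (q != ((pvStripEsc l).count '"' % 2 == 1)) := by
  induction l using pvStripEsc.induct with
  | case1 =>
      intro q; simp [pvStripEsc, List.foldl]
  | case2 c t ih =>
      intro q
      simpa [pvStripEsc, List.foldl, pvStepA] using ih q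
  | case3 c t hne ih =>
      intro q
      rcases t with _ | ⟨d, t'⟩
      · by_cases hc : c = '\\'
        · subst hc; simp [pvStripEsc, List.foldl, pvStepA]
        · by_cases hq : c = '"' <;>
            simp [pvStripEsc, List.foldl, pvStepA, hc, hq]
      · have hc : c ≠ '\\' := fun h => hne d t' h rfl
        have hs : pvStripEsc (c :: d :: t') = c :: pvStripEsc (d :: t') := by
          rw [pvStripEsc.eq_def]; simp
        have h1 : List.foldl pvStepA (q, false) (c :: d :: t')
            = List.foldl pvStepA ((if c = '"' then !q else q), false) (d :: t') := by
          by_cases hq : c = '"' <;> simp [List.foldl, pvStepA, hc, hq]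
        rw [h1, ih, hs]
        by_cases hq : c = '"'
        · simp only [hq, if_true, List.count_cons]
          cases q <;> cases hb : (List.count '"' (pvStripEsc (d :: t')) % 2 == 1) <;>
            simp_all <;> omega
        · simp [hq]

-- ===== VERDICT (by name: the statement is the Claim_ definition above) =====
theorem inside_double_quoted_string_py_spec : Claim_equal_inside_double_quoted_string_py := by
  intro text _
  unfold Spec_inside_double_quoted_string_py inside_double_quoted_string_py inside_double_quoted_string_py_alt
  simpa using pvFold_eq text.toList false
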